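-- pv_equiv track=rewrite | github.com/jgaye/LeetCodeSnippets | 1481/src.py | find_least_num_of_unique_ints_SLOW
-- ===== SOURCE A (Python) =====
-- from typing import List
-- from collections import defaultdict, Counter
--
-- def find_least_num_of_unique_ints_SLOW(arr: List[int], k: int) -> int:
--     """
--     Count appearance of elements in a defaultdict
--     Sort with increasing count value
--     Going through the elements, reduce k by counts. If a count gets to 0, pop the element.
--     Then count the nb of elements lefts in the dict
--
--
--     Runtime 1153 ms
--     Beats 5.01 % of users with Python3
--     Memory 36.84 MB
--     Beats 40.07 % of users with Python3
--     """
--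
--     def default_to_zero():
--         return 0
--
--     counts = defaultdict(default_to_zero)
--     for e in arr:
--         counts[e] = counts[e] + 1
--
--     sorted_counts = [v for k, v in sorted(counts.items(), key=lambda e: e[1])]
--
--     while k > 0:
--         k -= sorted_counts[0]
--         if k >= 0:
--             sorted_counts.pop(0)
--
--     return len(sorted_counts)
-- ===== SOURCE B (Python) =====
-- from typing import List
-- from collections import Counter
--
-- def find_least_num_of_unique_ints_SLOW(arr: List[int], k: int) -> int:
--     counts = sorted(Counter(arr).values())
--     removed = 0
--     for c in counts:
--         if k < c:
--             break
--         k -= c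
--         removed += 1
--     return len(counts) - removed
-- ===== Notes on version B (the rewrite author's own statement) =====
-- stated objective: faster
-- what changed: Replaces the dict-items sort plus destructive pop(0) loop (quadratic in the number of distinct values) with sorting Counter values directly and a single non-destructive scan that counts how many smallest counts fit into k.
import Mathlib
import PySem

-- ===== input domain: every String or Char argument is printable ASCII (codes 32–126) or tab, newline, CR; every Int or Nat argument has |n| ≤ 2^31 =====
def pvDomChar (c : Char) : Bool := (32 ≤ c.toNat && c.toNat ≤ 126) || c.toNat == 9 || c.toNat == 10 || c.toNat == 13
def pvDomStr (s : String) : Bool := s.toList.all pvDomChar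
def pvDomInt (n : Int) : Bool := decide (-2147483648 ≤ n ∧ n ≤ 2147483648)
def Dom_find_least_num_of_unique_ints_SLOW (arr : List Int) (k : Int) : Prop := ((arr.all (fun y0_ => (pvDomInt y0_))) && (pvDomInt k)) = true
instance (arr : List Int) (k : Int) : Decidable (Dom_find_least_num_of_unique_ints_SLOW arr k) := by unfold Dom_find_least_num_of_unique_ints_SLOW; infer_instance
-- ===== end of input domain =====

-- B sorts Counter values directly and counts removable smallest counts in one
-- non-destructive scan, instead of A's items-sort plus pop(0) loop (faster; asymptotic).

-- ===== PORT A =====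
-- A's 'while k > 0: k -= sorted_counts[0]; if k >= 0: sorted_counts.pop(0)' loop;
-- on [] with k > 0 Python raises IndexError (excluded by Pre_), the port returns 0 there.
def pvLoopA (l : List Int) (k : Int) : Int :=
  if k ≤ 0 then (l.length : Int)
  else
    match l with
    | [] => 0
    | c :: rest => if 0 ≤ k - c then pvLoopA rest (k - c) else ((c :: rest).length : Int)

def find_least_num_of_unique_ints_SLOW (arr : List Int) (k : Int) : Int :=
  let counts := arr.foldl (fun d e => d.insert e (d.getD e 0 + 1)) (PySem.Dict.empty : PySem.Dict Int Int)
  let sorted_counts := (PySem.List.sorted counts.items (fun e => e.2) false).map (fun p => p.2)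
  pvLoopA sorted_counts k

-- ===== PORT B =====
-- B's 'for c in counts: if k < c: break; k -= c; removed += 1' loop, returning removed
def pvRemovedB (l : List Int) (k : Int) : Int :=
  match l with
  | [] => 0
  | c :: rest => if k < c then 0 else pvRemovedB rest (k - c) + 1

def find_least_num_of_unique_ints_SLOW_alt (arr : List Int) (k : Int) : Int :=
  let counts := PySem.List.sorted (PySem.Dict.counter arr).values (fun x => x) false
  (counts.length : Int) - pvRemovedB counts k

-- ===== PRECONDITION & SPEC =====
-- A raises IndexError when k exceeds the total number of elements (it empties the list and indexes it)
def Pre_find_least_num_of_unique_ints_SLOW (arr : List Int) (k : Int) : Prop := k ≤ (arr.length : Int)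
instance (arr : List Int) (k : Int) : Decidable (Pre_find_least_num_of_unique_ints_SLOW arr k) := by unfold Pre_find_least_num_of_unique_ints_SLOW; infer_instance
def pvWitness_find_least_num_of_unique_ints_SLOW : List Int × Int := ([1, 2, 2], 2)

def Spec_find_least_num_of_unique_ints_SLOW (arr : List Int) (k : Int) (out : Int) : Prop := out = find_least_num_of_unique_ints_SLOW_alt arr k
instance (arr : List Int) (k : Int) (out : Int) : Decidable (Spec_find_least_num_of_unique_ints_SLOW arr k out) := by unfold Spec_find_least_num_of_unique_ints_SLOW; infer_instance

-- ===== CLAIM (what is proved, stated in full; the proofs are below) =====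
def Claim_equal_find_least_num_of_unique_ints_SLOW : Prop := ∀ (arr : List Int) (k : Int), Dom_find_least_num_of_unique_ints_SLOW arr k → Pre_find_least_num_of_unique_ints_SLOW arr k → Spec_find_least_num_of_unique_ints_SLOW arr k (find_least_num_of_unique_ints_SLOW arr k)

-- ===== LEMMAS AND PROOFS =====

-- the two sorted count lists coincide: map-snd of the items sorted by value = sorted values
lemma pv_sorted_counts_eq (items : List (Int × Int)) :
    (PySem.List.sorted items (fun e => e.2) false).map (fun p => p.2)
      = PySem.List.sorted (items.map (fun p => p.2)) (fun x => x) false := by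
  apply PySem.List.eq_of_perm_of_pairwise_le_of_injective (key := fun x : Int => x)
    (fun _ _ h => h)
  · exact ((PySem.List.sorted_perm items (fun e => e.2) false).map _).trans
      (PySem.List.sorted_perm (items.map (fun p => p.2)) (fun x => x) false).symm
  · exact List.Pairwise.map (fun p : Int × Int => p.2) (fun _ _ h => h)
      (PySem.List.sorted_pairwise items (fun e => e.2))
  · exact PySem.List.sorted_pairwise (items.map (fun p => p.2)) (fun x => x)

-- loop equivalence on a list of positive counts whose sum covers k
lemma pv_loop_eq (l : List Int) (k : Int) (hpos : ∀ c ∈ l, 1 ≤ c) (hk : k ≤ l.sum) :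
    pvLoopA l k = (l.length : Int) - pvRemovedB l k := by
  induction l generalizing k with
  | nil =>
      simp at hk
      simp [pvLoopA, pvRemovedB, hk]
  | cons c rest ih =>
      by_cases h0 : k ≤ 0
      · have hc : 1 ≤ c := hpos c (by simp)
        rw [pvLoopA, pvRemovedB]
        simp only [if_pos h0, if_pos (by omega : k < c)]
        simp only [List.length_cons]; push_cast; ring
      · rw [pvLoopA, pvRemovedB]
        simp only [if_neg h0]
        by_cases hkc : k < c
        · rw [if_neg (by omega : ¬ 0 ≤ k - c), if_pos hkc]
          simp only [List.length_cons]; push_cast; ring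
        · rw [if_pos (by omega : 0 ≤ k - c), if_neg hkc]
          have hsum : k - c ≤ rest.sum := by
            have := hk; simp [List.sum_cons] at this ⊢; omega
          rw [ih (k - c) (fun x hx => hpos x (by simp [hx])) hsum]
          simp only [List.length_cons]; push_cast; ring

-- sum of the distinct-value counts is the length of the list
lemma pv_sum_counts (arr : List Int) :
    (((PySem.Set.ofList arr).map (fun v => (arr.count v : Int))).sum) = (arr.length : Int) := by
  have hperm : (PySem.Set.ofList arr).Perm arr.dedup := by
    apply (List.perm_ext_iff_of_nodup (PySem.Set.nodup_ofList arr) arr.nodup_dedup).2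
    intro a
    rw [PySem.Set.mem_ofList, List.mem_dedup]
  have := (hperm.map (fun v => (arr.count v : Int))).sum_eq
  rw [this]
  have hnat : (arr.dedup.map (fun v => arr.count v)).sum = arr.length :=
    List.sum_map_count_dedup_eq_length arr
  rw [← hnat]
  push_cast
  rw [List.map_map]
  rfl

-- ===== VERDICT (by name: the statement is the Claim_ definition above) =====
lemma pv_values_counter (arr : List Int) :
    (PySem.Dict.counter arr).values = (PySem.Set.ofList arr).map (fun v => (arr.count v : Int)) := by
  show (PySem.Dict.counter arr).items.map (fun p => p.2) = _
  rw [PySem.Dict.items_counter, List.map_map]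
  rfl

theorem find_least_num_of_unique_ints_SLOW_spec : Claim_equal_find_least_num_of_unique_ints_SLOW := by
  intro arr k _ hpre
  unfold Pre_find_least_num_of_unique_ints_SLOW at hpre
  unfold Spec_find_least_num_of_unique_ints_SLOW
  unfold find_least_num_of_unique_ints_SLOW find_least_num_of_unique_ints_SLOW_alt
  simp only [PySem.Dict.foldl_insert_getD_add_one_eq_counter, pv_sorted_counts_eq]
  have hval : (PySem.Dict.counter arr : PySem.Dict Int Int).items.map (fun p => p.2)
      = (PySem.Dict.counter arr).values := rfl
  rw [hval]
  apply pv_loop_eq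
  · intro c hc
    rw [PySem.List.mem_sorted, pv_values_counter, List.mem_map] at hc
    obtain ⟨v, hv, rfl⟩ := hc
    have hm : v ∈ arr := (PySem.Set.mem_ofList arr v).1 hv
    have := List.count_pos_iff.2 hm
    omega
  · have hp : (PySem.List.sorted (PySem.Dict.counter arr).values (fun x => x) false).sum
        = (PySem.Dict.counter arr).values.sum :=
      (PySem.List.sorted_perm (PySem.Dict.counter arr).values (fun x => x) false).sum_eq
    rw [hp, pv_values_counter, pv_sum_counts]
    exact hpre
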